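-- pv_equiv track=rewrite | github.com/sashaaero/binarysearch-problems | problems/harder/anagram_partitioning.py | solve
-- ===== SOURCE A (Python) =====
-- from collections import defaultdict
--
-- def solve(s, t):
--     a = defaultdict(lambda: 1)
--     b = defaultdict(lambda: 1)
--     l = [0]
--
--     if sorted(s) != sorted(t):
--         return []
--
--     for i in range(len(s)):
--         a[s[i]] += (s[i] in a)
--         b[t[i]] += (t[i] in b)
--         if a == b and i < len(s) - 1:
--             l.append(i + 1)
--
--     return l
-- ===== SOURCE B (Python) =====
-- from collections import Counter
--
-- def solve(s, t):
--     # One pass with an incrementally maintained mismatch counter instead of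
--     # comparing the whole prefix-count dicts at every index.
--     if Counter(s) != Counter(t):
--         return []
--     res = [0]
--     diff = {}
--     mismatches = 0
--     for i in range(len(s) - 1):
--         for c, d in ((s[i], 1), (t[i], -1)):
--             v = diff.get(c, 0) + d
--             diff[c] = v
--             if v == 0:
--                 mismatches -= 1
--             elif v == d:
--                 mismatches += 1
--         if mismatches == 0:
--             res.append(i + 1)
--     return res
-- ===== Notes on version B (the rewrite author's own statement) =====
-- stated objective: alternative
-- what changed: Instead of rebuilding and comparing the two whole prefix-count dicts at every index (A compares a == b each iteration, which scans every distinct character seen so far), B keeps a single running count-difference dict and an incrementally updated mismatch counter, so each step touches only the two characters at the current index; the initial sorted(s) != sorted(t) check becomes a Counter equality check.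
import Mathlib
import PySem

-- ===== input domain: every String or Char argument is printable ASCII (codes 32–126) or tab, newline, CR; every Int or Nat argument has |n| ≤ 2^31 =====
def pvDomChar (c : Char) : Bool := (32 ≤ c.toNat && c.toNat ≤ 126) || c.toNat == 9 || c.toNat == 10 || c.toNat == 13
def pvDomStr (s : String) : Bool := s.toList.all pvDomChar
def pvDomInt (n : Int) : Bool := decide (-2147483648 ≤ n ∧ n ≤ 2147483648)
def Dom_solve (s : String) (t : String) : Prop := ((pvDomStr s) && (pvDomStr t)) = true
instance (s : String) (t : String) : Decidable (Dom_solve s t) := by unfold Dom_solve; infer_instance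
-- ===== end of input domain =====

-- B replaces A's per-index comparison of the two whole prefix-count dicts by one running
-- difference dict plus an incrementally maintained mismatch counter (objective: alternative).

-- ===== PORT A =====

-- Python's `d == e` on dicts: same key set and, key by key, equal values (keys are unique,
-- and under the first conjunct every compared key is present in both, so `getD _ 0` is its value).
def pyDictEq (d e : PySem.Dict Char Int) : Bool :=
  PySem.Set.equal d.keys e.keys && d.keys.all (fun k => d.getD k 0 == e.getD k 0)

-- `a[c] += (c in a)` on `a = defaultdict(lambda: 1)`: the load `a[c]` first inserts the
-- default 1 if `c` is missing; the membership test runs after that load, hence is always True.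
def bumpA (d : PySem.Dict Char Int) (c : Char) : PySem.Dict Char Int :=
  let d' := if d.contains c then d else d.insert c 1
  d'.insert c (d'.getD c 0 + (if d'.contains c then (1 : Int) else 0))

def solve (s : String) (t : String) : List Int :=
  let ls := s.toList
  let lt := t.toList
  if PySem.List.sorted ls (fun c => c) false ≠ PySem.List.sorted lt (fun c => c) false then
    []
  else
    let r := (PySem.List.pyRange 0 (PySem.Str.len s) 1).foldl
      (fun (st : PySem.Dict Char Int × PySem.Dict Char Int × List Int) i =>
        let a := bumpA st.1 (PySem.List.pyGetD ls i ' ')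
        let b := bumpA st.2.1 (PySem.List.pyGetD lt i ' ')
        let l := if pyDictEq a b && decide (i < PySem.Str.len s - 1) then st.2.2 ++ [i + 1] else st.2.2
        (a, b, l))
      (PySem.Dict.empty, PySem.Dict.empty, [(0 : Int)])
    r.2.2

-- ===== PORT B =====

-- one `diff[c] = diff.get(c, 0) + d` update together with the mismatch-counter adjustment
def bumpB (st : PySem.Dict Char Int × Int) (p : Char × Int) : PySem.Dict Char Int × Int :=
  let v := st.1.getD p.1 0 + p.2
  let diff := st.1.insert p.1 v
  let m := if v == 0 then st.2 - 1 else if v == p.2 then st.2 + 1 else st.2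
  (diff, m)

def solve_alt (s : String) (t : String) : List Int :=
  let ls := s.toList
  let lt := t.toList
  if pyDictEq (PySem.Dict.counter ls) (PySem.Dict.counter lt) = false then
    []
  else
    let r := (PySem.List.pyRange 0 (PySem.Str.len s - 1) 1).foldl
      (fun (st : (PySem.Dict Char Int × Int) × List Int) i =>
        let dm := [(PySem.List.pyGetD ls i ' ', (1 : Int)), (PySem.List.pyGetD lt i ' ', (-1 : Int))].foldl bumpB st.1
        let res := if dm.2 == 0 then st.2 ++ [i + 1] else st.2
        (dm, res))
      ((PySem.Dict.empty, 0), [(0 : Int)])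
    r.2

-- ===== PRECONDITION & SPEC =====
def Spec_solve (s : String) (t : String) (out : List Int) : Prop := out = solve_alt s t
instance (s : String) (t : String) (out : List Int) : Decidable (Spec_solve s t out) := by unfold Spec_solve; infer_instance

-- ===== CLAIM (what is proved, stated in full; the proofs are below) =====
def Claim_equal_solve : Prop := ∀ (s : String) (t : String), Dom_solve s t → Spec_solve s t (solve s t)


-- ===== LEMMAS AND PROOFS =====

-- prefix counts agree at cut k (Bool form, bounded so it is computable)
def goodB (ls lt : List Char) (k : Nat) : Bool :=
  ((ls.take k) ++ (lt.take k)).all (fun c => (ls.take k).count c == (lt.take k).count c)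

-- A's counting dict after a prefix
def bA (xs : List Char) : PySem.Dict Char Int := xs.foldl bumpA PySem.Dict.empty

lemma bumpA_contains (d : PySem.Dict Char Int) (x c : Char) :
    (bumpA d x).contains c = (c == x || d.contains c) := by
  simp only [bumpA]
  by_cases h : d.contains x = true <;>
    by_cases hcx : c = x <;>
      simp [h, hcx, PySem.Dict.contains_insert]

lemma bumpA_getD_self (d : PySem.Dict Char Int) (x : Char) :
    (bumpA d x).getD x 0 = if d.contains x then d.getD x 0 + 1 else 2 := by
  simp only [bumpA]
  by_cases h : d.contains x = true
  · simp [h, PySem.Dict.getD_insert_self]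
  · simp [h, PySem.Dict.getD_insert_self, PySem.Dict.contains_insert_self]

lemma bumpA_getD_ne (d : PySem.Dict Char Int) (x c : Char) (h : c ≠ x) :
    (bumpA d x).getD c 0 = d.getD c 0 := by
  simp only [bumpA]
  by_cases hd : d.contains x = true <;>
    simp [hd, PySem.Dict.getD_insert_of_ne _ _ _ h]

lemma bA_append (ys : List Char) (y : Char) : bA (ys ++ [y]) = bumpA (bA ys) y := by
  simp [bA, List.foldl_append]

lemma bA_contains (xs : List Char) (c : Char) : (bA xs).contains c = decide (c ∈ xs) := by
  induction xs using List.reverseRecOn with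
  | nil => simp [bA, PySem.Dict.contains_empty]
  | append_singleton ys y ih =>
      rw [bA_append, bumpA_contains, ih]
      by_cases h : c = y <;> simp [h]

lemma mem_keys_bA (xs : List Char) (c : Char) : c ∈ (bA xs).keys ↔ c ∈ xs := by
  rw [← PySem.Dict.contains_iff_mem_keys, bA_contains]; simp

lemma bA_getD (xs : List Char) (c : Char) :
    (bA xs).getD c 0 = if c ∈ xs then (xs.count c : Int) + 1 else 0 := by
  induction xs using List.reverseRecOn with
  | nil => simp [bA, PySem.Dict.getD_empty]
  | append_singleton ys y ih =>
      rw [bA_append]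
      by_cases h : c = y
      · subst h
        rw [bumpA_getD_self, bA_contains, ih]
        by_cases hy : c ∈ ys <;>
          simp [hy, List.count_append, List.count_eq_zero_of_not_mem] <;> push_cast <;> omega
      · rw [bumpA_getD_ne _ _ _ h, ih]
        have hy1 : List.count c [y] = 0 := List.count_eq_zero_of_not_mem (by simp [h])
        by_cases hy : c ∈ ys <;> simp [hy, h, List.count_append, hy1]

lemma pyDictEq_true_iff (d e : PySem.Dict Char Int) :
    pyDictEq d e = true ↔
      ((∀ c : Char, c ∈ d.keys ↔ c ∈ e.keys) ∧ ∀ c ∈ d.keys, d.getD c 0 = e.getD c 0) := by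
  simp only [pyDictEq, PySem.Set.equal, PySem.Set.issubset, PySem.Set.contains,
    Bool.and_eq_true, List.all_eq_true, List.contains_iff_mem, beq_iff_eq]
  constructor
  · rintro ⟨⟨h1, h2⟩, h3⟩
    exact ⟨fun c => ⟨fun hc => h1 c hc, fun hc => h2 c hc⟩, h3⟩
  · rintro ⟨h, h3⟩
    exact ⟨⟨fun c hc => (h c).1 hc, fun c hc => (h c).2 hc⟩, h3⟩

lemma all_count_iff (xs ys : List Char) :
    ((xs ++ ys).all (fun c => xs.count c == ys.count c) = true) ↔
      ∀ c : Char, xs.count c = ys.count c := by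
  simp only [List.all_eq_true, List.mem_append, beq_iff_eq]
  constructor
  · intro h c
    by_cases hc : c ∈ xs ∨ c ∈ ys
    · exact h c hc
    · push_neg at hc
      rw [List.count_eq_zero_of_not_mem hc.1, List.count_eq_zero_of_not_mem hc.2]
  · exact fun h c _ => h c

lemma pyDictEq_bA_count (xs ys : List Char) :
    pyDictEq (bA xs) (bA ys) = (xs ++ ys).all (fun c => xs.count c == ys.count c) := by
  rw [Bool.eq_iff_iff, pyDictEq_true_iff, all_count_iff]
  constructor
  · rintro ⟨hk, hv⟩ c
    by_cases hx : c ∈ xs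
    · have hy : c ∈ ys := (mem_keys_bA ys c).1 ((hk c).1 ((mem_keys_bA xs c).2 hx))
      have hval := hv c ((mem_keys_bA xs c).2 hx)
      rw [bA_getD, bA_getD] at hval
      simp only [hx, hy, if_pos] at hval
      omega
    · have hy : c ∉ ys := fun hy =>
        hx ((mem_keys_bA xs c).1 ((hk c).2 ((mem_keys_bA ys c).2 hy)))
      rw [List.count_eq_zero_of_not_mem hx, List.count_eq_zero_of_not_mem hy]
  · intro h
    refine ⟨fun c => ?_, fun c hc => ?_⟩
    · rw [mem_keys_bA, mem_keys_bA, ← List.count_pos_iff, ← List.count_pos_iff, h c]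
    · have hcx : c ∈ xs := (mem_keys_bA xs c).1 hc
      have hcy : c ∈ ys := by
        rw [← List.count_pos_iff, ← h c, List.count_pos_iff]; exact hcx
      rw [bA_getD, bA_getD]
      simp [hcx, hcy, h c]

lemma pyDictEq_bA_goodB (ls lt : List Char) (k : Nat) :
    pyDictEq (bA (ls.take k)) (bA (lt.take k)) = goodB ls lt k :=
  pyDictEq_bA_count _ _

lemma pyDictEq_counter (xs ys : List Char) :
    (pyDictEq (PySem.Dict.counter xs) (PySem.Dict.counter ys) = true) ↔
      ∀ c : Char, xs.count c = ys.count c := by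
  rw [pyDictEq_true_iff]
  constructor
  · rintro ⟨hk, hv⟩ c
    by_cases hx : c ∈ xs
    · have hmx : c ∈ (PySem.Dict.counter xs).keys := by
        rw [PySem.Dict.keys_counter, PySem.Set.mem_ofList]; exact hx
      have := hv c hmx
      rw [PySem.Dict.getD_counter, PySem.Dict.getD_counter] at this
      exact_mod_cast this
    · have hy : c ∉ ys := fun hy => hx (by
        have hmy : c ∈ (PySem.Dict.counter ys).keys := by
          rw [PySem.Dict.keys_counter, PySem.Set.mem_ofList]; exact hy
        have := (hk c).2 hmy
        rwa [PySem.Dict.keys_counter, PySem.Set.mem_ofList] at this)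
      rw [List.count_eq_zero_of_not_mem hx, List.count_eq_zero_of_not_mem hy]
  · intro h
    refine ⟨fun c => ?_, fun c _ => ?_⟩
    · rw [PySem.Dict.keys_counter, PySem.Dict.keys_counter, PySem.Set.mem_ofList,
        PySem.Set.mem_ofList, ← List.count_pos_iff, ← List.count_pos_iff, h c]
    · rw [PySem.Dict.getD_counter, PySem.Dict.getD_counter]
      exact_mod_cast h c

lemma sorted_eq_iff (xs ys : List Char) :
    PySem.List.sorted xs (fun c => c) false = PySem.List.sorted ys (fun c => c) false ↔
      ∀ c : Char, xs.count c = ys.count c := by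
  constructor
  · intro h c
    have p1 := PySem.List.sorted_perm xs (fun c => c) false
    have p2 := PySem.List.sorted_perm ys (fun c => c) false
    have h' : (PySem.List.sorted xs (fun c => c) false).Perm ys := h ▸ p2
    exact (p1.symm.trans h').count_eq c
  · intro h
    have hp : xs.Perm ys := List.perm_iff_count.mpr (fun a => h a)
    have hp' : (PySem.List.sorted xs (fun c => c) false).Perm
        (PySem.List.sorted ys (fun c => c) false) :=
      (PySem.List.sorted_perm xs (fun c => c) false).trans
        (hp.trans (PySem.List.sorted_perm ys (fun c => c) false).symm)
    exact List.eq_of_perm_of_sorted (fun a b _ _ h1 h2 => le_antisymm h1 h2)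
      (PySem.List.sorted_pairwise xs (fun c => c)) (PySem.List.sorted_pairwise ys (fun c => c)) hp'

-- ---- B's loop invariant ----

def InvB (ls lt : List Char) (k : Nat) (st : PySem.Dict Char Int × Int) : Prop :=
  (∀ c : Char, st.1.getD c 0 = ((ls.take k).count c : Int) - ((lt.take k).count c : Int)) ∧
  st.1.keys.Nodup ∧
  st.2 = ((st.1.keys.filter (fun c => st.1.getD c 0 != 0)).length : Int)

lemma bumpB_fst_getD (st : PySem.Dict Char Int × Int) (c : Char) (d : Int) (x : Char) :
    (bumpB st (c, d)).1.getD x 0 = if x = c then st.1.getD c 0 + d else st.1.getD x 0 := by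
  simp [bumpB, PySem.Dict.getD_insert]

lemma filter_length_update (l : List Char) (p q : Char → Bool) (c : Char)
    (hl : l.Nodup) (hc : c ∈ l) (hpq : ∀ x, x ≠ c → p x = q x) :
    (l.filter q).length + (if p c then 1 else 0) = (l.filter p).length + (if q c then 1 else 0) := by
  induction l with
  | nil => simp at hc
  | cons a l ih =>
    rcases List.nodup_cons.mp hl with ⟨ha, hl'⟩
    by_cases hac : a = c
    · subst hac
      have hq : l.filter q = l.filter p :=
        List.filter_congr (fun x hx => (hpq x (fun hxa => ha (hxa ▸ hx))).symm)
      simp only [List.filter_cons]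
      rw [hq]
      by_cases hp : p a = true <;> by_cases hq2 : q a = true <;> simp [hp, hq2] <;> omega
    · have hcl : c ∈ l := by
        rcases List.mem_cons.mp hc with h | h
        · exact absurd h.symm hac
        · exact h
      have hpa : p a = q a := hpq a hac
      simp only [List.filter_cons]
      rw [hpa]
      have := ih hl' hcl
      by_cases hq2 : q a = true <;> simp [hq2] <;> omega

lemma bumpB_inv (st : PySem.Dict Char Int × Int) (c : Char) (d : Int) (hd : d ≠ 0)
    (h2 : st.1.keys.Nodup)
    (h3 : st.2 = ((st.1.keys.filter (fun x => st.1.getD x 0 != 0)).length : Int)) :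
    (bumpB st (c, d)).1.keys.Nodup ∧
    (bumpB st (c, d)).2 =
      (((bumpB st (c, d)).1.keys.filter (fun x => (bumpB st (c, d)).1.getD x 0 != 0)).length : Int) := by
  refine ⟨by simpa [bumpB] using PySem.Dict.nodup_keys_insert _ _ _ h2, ?_⟩
  simp only [bumpB]
  set old := st.1.getD c 0 with hold
  by_cases hc : st.1.contains c = true
  · have hk : (st.1.insert c (old + d)).keys = st.1.keys :=
      PySem.Dict.keys_insert_of_contains _ _ hc
    have hmem : c ∈ st.1.keys := (PySem.Dict.contains_iff_mem_keys _ _).1 hc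
    have hupd := filter_length_update st.1.keys
      (fun x => st.1.getD x 0 != 0)
      (fun x => (st.1.insert c (old + d)).getD x 0 != 0) c h2 hmem
      (fun x hx => by simp [PySem.Dict.getD_insert_of_ne st.1 _ _ hx])
    simp only [PySem.Dict.getD_insert_self] at hupd
    rw [hk, h3]
    simp only [bne_iff_ne, ne_eq, beq_iff_eq] at hupd ⊢
    split_ifs at hupd ⊢ <;> omega
  · have hcf : st.1.contains c = false := by simpa using hc
    have hk : (st.1.insert c (old + d)).keys = st.1.keys ++ [c] :=
      PySem.Dict.keys_insert_of_not_contains _ _ hcf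
    have hold0 : old = 0 := PySem.Dict.getD_of_not_contains _ _ hcf
    have hfeq : st.1.keys.filter (fun x => (st.1.insert c (old + d)).getD x 0 != 0)
        = st.1.keys.filter (fun x => st.1.getD x 0 != 0) := by
      apply List.filter_congr
      intro x hx
      have hxc : x ≠ c := fun hh => by
        rw [hh] at hx
        rw [(PySem.Dict.contains_iff_mem_keys st.1 c).2 hx] at hcf
        exact Bool.noConfusion hcf
      simp [PySem.Dict.getD_insert_of_ne st.1 _ _ hxc]
    have hsing : List.filter (fun x => (st.1.insert c (old + d)).getD x 0 != 0) [c] = [c] := by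
      have : (st.1.insert c (old + d)).getD c 0 = old + d := PySem.Dict.getD_insert_self _ _ _ _
      simp [hold0, hd]
    rw [hk, h3, List.filter_append, hfeq, hsing]
    simp only [hold0, beq_iff_eq, List.length_append, List.length_singleton]
    have hne : ¬ ((0 : Int) + d = 0) := by omega
    rw [if_neg hne, if_pos (by omega : (0 : Int) + d = d)]
    push_cast
    omega

lemma mism_zero_iff (st : PySem.Dict Char Int × Int) (ls lt : List Char) (k : Nat)
    (h : InvB ls lt k st) : (st.2 == 0) = goodB ls lt k := by
  obtain ⟨h1, h2, h3⟩ := h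
  rw [Bool.eq_iff_iff, beq_iff_eq]
  unfold goodB
  rw [all_count_iff]
  constructor
  · intro hz c
    have hlen : (st.1.keys.filter (fun c => st.1.getD c 0 != 0)).length = 0 := by
      rw [hz] at h3
      exact_mod_cast h3.symm
    have hnil : st.1.keys.filter (fun c => st.1.getD c 0 != 0) = [] :=
      List.length_eq_zero_iff.1 hlen
    have hz' : st.1.getD c 0 = 0 := by
      by_cases hx : st.1.contains c = true
      · by_contra hne
        have hmem : c ∈ st.1.keys.filter (fun c => st.1.getD c 0 != 0) :=
          List.mem_filter.2 ⟨(PySem.Dict.contains_iff_mem_keys _ _).1 hx,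
            by simpa [bne_iff_ne] using hne⟩
        rw [hnil] at hmem
        simp at hmem
      · exact PySem.Dict.getD_of_not_contains _ _ (by simpa using hx)
    have := h1 c
    omega
  · intro hg
    rw [h3]
    have hnil : st.1.keys.filter (fun c => st.1.getD c 0 != 0) = [] := by
      apply List.filter_eq_nil_iff.2
      intro x _
      have hx1 := h1 x
      have hx2 := hg x
      simp only [bne_iff_ne, ne_eq]
      omega
    rw [hnil]
    simp

-- ---- loop closed forms ----

lemma loopA (ls lt : List Char) (n : Int) (m : Nat) (hm : m ≤ ls.length) (hm' : m ≤ lt.length) :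
    (PySem.List.pyRange 0 (m : Int) 1).foldl
      (fun (st : PySem.Dict Char Int × PySem.Dict Char Int × List Int) i =>
        (bumpA st.1 (PySem.List.pyGetD ls i ' '), bumpA st.2.1 (PySem.List.pyGetD lt i ' '),
          if pyDictEq (bumpA st.1 (PySem.List.pyGetD ls i ' '))
              (bumpA st.2.1 (PySem.List.pyGetD lt i ' ')) && decide (i < n - 1) then
            st.2.2 ++ [i + 1] else st.2.2))
      (PySem.Dict.empty, PySem.Dict.empty, [(0 : Int)]) =
    (bA (ls.take m), bA (lt.take m),
      (0 : Int) :: ((List.range m).filter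
        (fun k => pyDictEq (bA (ls.take (k + 1))) (bA (lt.take (k + 1))) && decide ((k : Int) < n - 1))).map
        (fun k => (k : Int) + 1)) := by
  induction m with
  | zero => simp [bA, PySem.List.pyRange_one_eq_nil (le_refl (0 : Int))]
  | succ m ih =>
    have hm0 : m ≤ ls.length := Nat.le_of_succ_le hm
    have hm0' : m ≤ lt.length := Nat.le_of_succ_le hm'
    have hml : m < ls.length := hm
    have hml' : m < lt.length := hm'
    have hcast : ((m + 1 : Nat) : Int) = (m : Int) + 1 := by push_cast; ring
    rw [hcast, PySem.List.pyRange_one_succ_right (by positivity), List.foldl_append,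
      ih hm0 hm0', List.foldl_cons, List.foldl_nil]
    have hgl : PySem.List.pyGetD ls ((m : Nat) : Int) ' ' = ls[m] := by
      simp [List.getElem?_eq_getElem hml]
    have hgt : PySem.List.pyGetD lt ((m : Nat) : Int) ' ' = lt[m] := by
      simp [List.getElem?_eq_getElem hml']
    have hts : ls.take (m + 1) = ls.take m ++ [ls[m]] := by
      rw [List.take_succ, List.getElem?_eq_getElem hml]; rfl
    have htt : lt.take (m + 1) = lt.take m ++ [lt[m]] := by
      rw [List.take_succ, List.getElem?_eq_getElem hml']; rfl
    simp only [hgl, hgt, hts, htt, bA_append, List.range_succ, List.filter_append]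
    have hpm : (pyDictEq (bA (ls.take (m + 1))) (bA (lt.take (m + 1))) &&
        decide ((m : Int) < n - 1)) = (pyDictEq (bumpA (bA (ls.take m)) ls[m])
          (bumpA (bA (lt.take m)) lt[m]) && decide ((m : Int) < n - 1)) := by
      rw [hts, htt, bA_append, bA_append]
    rw [List.filter_cons, List.filter_nil, hpm]
    by_cases hcond : (pyDictEq (bumpA (bA (ls.take m)) ls[m]) (bumpA (bA (lt.take m)) lt[m])
        && decide ((m : Int) < n - 1)) = true
    · rw [if_pos hcond, if_pos hcond]
      simp
    · rw [if_neg hcond, if_neg hcond]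
      simp

lemma step_inv (ls lt : List Char) (m : Nat) (hm : m < ls.length) (hm' : m < lt.length)
    (st : PySem.Dict Char Int × Int) (h : InvB ls lt m st) :
    InvB ls lt (m + 1) (bumpB (bumpB st (ls[m], 1)) (lt[m], -1)) := by
  obtain ⟨h1, h2, h3⟩ := h
  have hmid := bumpB_inv st ls[m] 1 one_ne_zero h2 h3
  have hfin := bumpB_inv (bumpB st (ls[m], 1)) lt[m] (-1) (by norm_num) hmid.1 hmid.2
  refine ⟨?_, hfin.1, hfin.2⟩
  intro c
  have hts : ls.take (m + 1) = ls.take m ++ [ls[m]] := by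
    rw [List.take_succ, List.getElem?_eq_getElem hm]; rfl
  have htt : lt.take (m + 1) = lt.take m ++ [lt[m]] := by
    rw [List.take_succ, List.getElem?_eq_getElem hm']; rfl
  have h1c := h1 c
  have h1s := h1 ls[m]
  have h1t := h1 lt[m]
  have hs0 : (ls.take (m + 1)).count ls[m] = (ls.take m).count ls[m] + 1 := by
    rw [hts, List.count_append]; simp
  have ht0 : (lt.take (m + 1)).count lt[m] = (lt.take m).count lt[m] + 1 := by
    rw [htt, List.count_append]; simp
  have hsne : ∀ x, x ≠ ls[m] → (ls.take (m + 1)).count x = (ls.take m).count x := by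
    intro x hx
    rw [hts, List.count_append, List.count_eq_zero_of_not_mem (show x ∉ [ls[m]] by simp [hx]),
      Nat.add_zero]
  have htne : ∀ x, x ≠ lt[m] → (lt.take (m + 1)).count x = (lt.take m).count x := by
    intro x hx
    rw [htt, List.count_append, List.count_eq_zero_of_not_mem (show x ∉ [lt[m]] by simp [hx]),
      Nat.add_zero]
  rw [bumpB_fst_getD]
  by_cases hc2 : c = lt[m]
  · rw [if_pos hc2, bumpB_fst_getD]
    by_cases h3 : lt[m] = ls[m]
    · rw [if_pos h3, hc2, h3]
      rw [h3] at ht0 h1t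
      omega
    · rw [if_neg h3, hc2]
      have hs' := hsne lt[m] h3
      omega
  · rw [if_neg hc2, bumpB_fst_getD]
    by_cases hc1 : c = ls[m]
    · rw [if_pos hc1, hc1]
      have hne : ls[m] ≠ lt[m] := fun h => hc2 (hc1.trans h)
      have ht' := htne ls[m] hne
      omega
    · rw [if_neg hc1]
      have hs' := hsne c hc1
      have ht' := htne c hc2
      omega

lemma loopB (ls lt : List Char) (m : Nat) (hm : m ≤ ls.length) (hm' : m ≤ lt.length) :
    InvB ls lt m
      ((PySem.List.pyRange 0 (m : Int) 1).foldl
        (fun (st : (PySem.Dict Char Int × Int) × List Int) i =>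
          ([(PySem.List.pyGetD ls i ' ', (1 : Int)), (PySem.List.pyGetD lt i ' ', (-1 : Int))].foldl bumpB st.1,
            if ([(PySem.List.pyGetD ls i ' ', (1 : Int)), (PySem.List.pyGetD lt i ' ', (-1 : Int))].foldl bumpB st.1).2 == 0 then
              st.2 ++ [i + 1] else st.2))
        ((PySem.Dict.empty, 0), [(0 : Int)])).1 ∧
    ((PySem.List.pyRange 0 (m : Int) 1).foldl
        (fun (st : (PySem.Dict Char Int × Int) × List Int) i =>
          ([(PySem.List.pyGetD ls i ' ', (1 : Int)), (PySem.List.pyGetD lt i ' ', (-1 : Int))].foldl bumpB st.1,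
            if ([(PySem.List.pyGetD ls i ' ', (1 : Int)), (PySem.List.pyGetD lt i ' ', (-1 : Int))].foldl bumpB st.1).2 == 0 then
              st.2 ++ [i + 1] else st.2))
        ((PySem.Dict.empty, 0), [(0 : Int)])).2 =
      (0 : Int) :: ((List.range m).filter (fun k => goodB ls lt (k + 1))).map
        (fun k => (k : Int) + 1) := by
  induction m with
  | zero =>
    constructor
    · refine ⟨?_, ?_, ?_⟩ <;>
        simp [PySem.List.pyRange_one_eq_nil (le_refl (0 : Int)), PySem.Dict.getD_empty,
          PySem.Dict.keys_empty]
    · simp [PySem.List.pyRange_one_eq_nil (le_refl (0 : Int))]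
  | succ m ih =>
    have hm0 : m ≤ ls.length := Nat.le_of_succ_le hm
    have hm0' : m ≤ lt.length := Nat.le_of_succ_le hm'
    have hml : m < ls.length := hm
    have hml' : m < lt.length := hm'
    obtain ⟨ih1, ih2⟩ := ih hm0 hm0'
    have hcast : ((m + 1 : Nat) : Int) = (m : Int) + 1 := by push_cast; ring
    rw [hcast, PySem.List.pyRange_one_succ_right (by positivity), List.foldl_append,
      List.foldl_cons, List.foldl_nil]
    have hgl : PySem.List.pyGetD ls ((m : Nat) : Int) ' ' = ls[m] := by
      simp [List.getElem?_eq_getElem hml]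
    have hgt : PySem.List.pyGetD lt ((m : Nat) : Int) ' ' = lt[m] := by
      simp [List.getElem?_eq_getElem hml']
    dsimp only
    rw [List.foldl_cons, List.foldl_cons, List.foldl_nil, hgl, hgt]
    have hinv := step_inv ls lt m hml hml' _ ih1
    constructor
    · exact hinv
    · have hcond := mism_zero_iff _ ls lt (m + 1) hinv
      rw [ih2, hcond, List.range_succ, List.filter_append, List.filter_cons, List.filter_nil]
      by_cases hg : goodB ls lt (m + 1) = true
      · rw [if_pos hg, if_pos hg]
        simp
      · rw [if_neg hg, if_neg hg]
        simp

lemma range_filter_shift (n : Nat) (p : Nat → Bool) :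
    (List.range n).filter (fun k => p k && decide ((k : Int) < (n : Int) - 1)) =
      (List.range (n - 1)).filter p := by
  cases n with
  | zero => simp
  | succ n =>
    rw [List.range_succ, List.filter_append]
    have h1 : (List.range n).filter (fun k => p k && decide ((k : Int) < ((n + 1 : Nat) : Int) - 1)) =
        (List.range n).filter p := by
      apply List.filter_congr
      intro k hk
      have hkn : k < n := List.mem_range.1 hk
      simp [hkn]
    have h2 : List.filter (fun k => p k && decide ((k : Int) < ((n + 1 : Nat) : Int) - 1)) [n] = [] := by
      simp
    rw [h1, h2, List.append_nil]
    simp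

-- ===== VERDICT (by name: the statement is the Claim_ definition above) =====
theorem solve_spec : Claim_equal_solve := by
  intro s t _
  unfold Spec_solve solve solve_alt
  simp only [PySem.Str.len_eq]
  by_cases hcnt : ∀ c : Char, s.toList.count c = t.toList.count c
  · have hsorted : PySem.List.sorted s.toList (fun c => c) false =
        PySem.List.sorted t.toList (fun c => c) false := (sorted_eq_iff _ _).2 hcnt
    have hcountr : pyDictEq (PySem.Dict.counter s.toList) (PySem.Dict.counter t.toList) = true :=
      (pyDictEq_counter _ _).2 hcnt
    rw [if_neg (by simp [hsorted]), if_neg (by simp [hcountr])]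
    have hlen : s.toList.length = t.toList.length :=
      (List.perm_iff_count.mpr hcnt).length_eq
    refine Eq.trans (congrArg (fun r => r.2.2)
      (loopA s.toList t.toList (↑s.toList.length) s.toList.length le_rfl (le_of_eq hlen))) ?_
    rcases Nat.eq_zero_or_pos s.toList.length with h0 | hpos
    · rw [h0]
      simp
    · have hc1 : ((s.toList.length : Nat) : Int) - 1 = ((s.toList.length - 1 : Nat) : Int) := by
        omega
      conv_rhs => rw [hc1]
      refine Eq.trans ?_
        (loopB s.toList t.toList (s.toList.length - 1) (by omega) (by omega)).2.symm
      simp only [pyDictEq_bA_goodB]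
      rw [range_filter_shift s.toList.length (fun k => goodB s.toList t.toList (k + 1))]
  · have hsorted : ¬ (PySem.List.sorted s.toList (fun c => c) false =
        PySem.List.sorted t.toList (fun c => c) false) :=
      fun h => hcnt ((sorted_eq_iff _ _).1 h)
    have hcountr : pyDictEq (PySem.Dict.counter s.toList) (PySem.Dict.counter t.toList) = false := by
      cases h : pyDictEq (PySem.Dict.counter s.toList) (PySem.Dict.counter t.toList)
      · rfl
      · exact absurd ((pyDictEq_counter _ _).1 h) hcnt
    rw [if_pos hsorted, if_pos hcountr]
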